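-- pv_equiv track=rewrite | github.com/SinM9/Bioinformatic | 4.2 Median String Problem.py | FindMedianString
-- ===== SOURCE A (Python) =====
-- def ATGC_Combinations(k):
--     bases = ['A', 'C', 'G', 'T']
--     array = ['A', 'C', 'G', 'T']
--     for n in range(k - 1):
--         array1 = []
--         for i in array:
--             for j in bases:
--                 array1.append(i + j)
--         array = array1
--     return array
--
-- def Min_Hamming_Distance(s1, s2):
-- 	distance = len(s1)
-- 	for i in range(len(s2) - len(s1) + 1):
-- 		tmp = 0
-- 		for j in range(len(s1)):
-- 			if s1[j] != s2[i:i+len(s1)][j]: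
-- 				tmp += 1
-- 		if  distance > tmp:
-- 			distance = tmp
-- 	return distance
--
-- def FindMedianString(DNA, k):
--     res=[]
--     p = ATGC_Combinations(k)
--     distance = {}
--     min_s = len(DNA) * len(p)
--     for i in p:
--         count = 0
--         for j in range(len(DNA)):
--             count += Min_Hamming_Distance(i, DNA[j])
--         distance[i] = count
--         if min_s > count :
--             min_s = count
--     for i in distance.keys():
--         if (distance[i] == min_s):
--             res.append(i)
--     return res
-- ===== SOURCE B (Python) =====
-- def Min_Hamming_Distance(s1, s2):
-- 	distance = len(s1)
-- 	for i in range(len(s2) - len(s1) + 1):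
-- 		tmp = 0
-- 		for j in range(len(s1)):
-- 			if s1[j] != s2[i:i+len(s1)][j]:
-- 				tmp += 1
-- 		if  distance > tmp:
-- 			distance = tmp
-- 	return distance
--
-- def _kmers(k):
--     if k <= 1:
--         return ['A', 'C', 'G', 'T']
--     return [s + b for s in _kmers(k - 1) for b in ['A', 'C', 'G', 'T']]
--
-- def FindMedianString(DNA, k):
--     best = None
--     res = []
--     for kmer in _kmers(k):
--         count = sum(Min_Hamming_Distance(kmer, s) for s in DNA)
--         if best is None or count < best:
--             best, res = count, [kmer]
--         elif count == best:
--             res.append(kmer)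
--     return res
-- ===== Notes on version B (the rewrite author's own statement) =====
-- stated objective: simpler
-- what changed: FindMedianString keeps a running best score and running minimizer list in one pass over the k-mers (no distance dict, no second filtering scan), and the k-mer generator is a recursive comprehension instead of an iterated rebuild loop; Min_Hamming_Distance is kept verbatim.
import Mathlib
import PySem

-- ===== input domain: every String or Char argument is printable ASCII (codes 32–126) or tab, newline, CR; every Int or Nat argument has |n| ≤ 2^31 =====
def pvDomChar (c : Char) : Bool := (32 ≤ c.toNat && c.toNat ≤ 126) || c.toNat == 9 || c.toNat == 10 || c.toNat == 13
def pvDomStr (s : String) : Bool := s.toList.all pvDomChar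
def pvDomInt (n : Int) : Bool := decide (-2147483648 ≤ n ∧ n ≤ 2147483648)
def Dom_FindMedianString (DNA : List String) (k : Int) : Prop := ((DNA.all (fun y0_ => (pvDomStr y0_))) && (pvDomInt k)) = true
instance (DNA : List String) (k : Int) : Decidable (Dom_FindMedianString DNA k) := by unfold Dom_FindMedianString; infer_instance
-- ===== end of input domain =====

-- B replaces A's distance dict + second filtering scan by one running-argmin pass over the
-- k-mers, and generates the k-mers recursively; Min_Hamming_Distance is identical in both
-- Pythons and is therefore ported once as pvMHD (objective: simpler).

-- ===== PORT A =====
def pvBases : List String := ["A", "C", "G", "T"]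

-- Min_Hamming_Distance, identical in Source A and Source B (ported once, used by both ports).
-- Ported on .toList; every index j is in range and every slice has length len(s1) when the
-- window loop runs, so pyGetD's default ' ' is never used.
def pvMHD (s1 s2 : String) : Int :=
  let l1 := s1.toList
  let l2 := s2.toList
  let n : Int := (l1.length : Int)
  (PySem.List.pyRange 0 ((l2.length : Int) - n + 1) 1).foldl
    (fun distance i =>
      let w := PySem.List.slice l2 (some i) (some (i + n))
      let tmp := (PySem.List.pyRange 0 n 1).foldl
        (fun tmp j =>
          if PySem.List.pyGetD l1 j ' ' ≠ PySem.List.pyGetD w j ' ' then tmp + 1 else tmp) 0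
      if distance > tmp then tmp else distance)
    n

def ATGC_Combinations (k : Int) : List String :=
  (PySem.List.pyRange 0 (k - 1) 1).foldl
    (fun array _ =>
      array.foldl (fun array1 i => pvBases.foldl (fun a1 j => a1 ++ [i ++ j]) array1) [])
    pvBases

def FindMedianString (DNA : List String) (k : Int) : List String :=
  let p := ATGC_Combinations k
  let st := p.foldl
    (fun (st : PySem.Dict String Int × Int) i =>
      let count := (PySem.List.pyRange 0 (DNA.length : Int) 1).foldl
        (fun c j => c + pvMHD i (PySem.List.pyGetD DNA j "")) 0
      (st.1.insert i count, if st.2 > count then count else st.2))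
    (PySem.Dict.empty, (DNA.length : Int) * (p.length : Int))
  st.1.keys.foldl (fun res i => if st.1.getD i 0 == st.2 then res ++ [i] else res) []

-- ===== PORT B =====
def pvKmers (k : Int) : List String :=
  if k ≤ 1 then pvBases
  else (pvKmers (k - 1)).flatMap (fun s => pvBases.map (fun b => s ++ b))
termination_by (k - 1).toNat
decreasing_by omega

def FindMedianString_alt (DNA : List String) (k : Int) : List String :=
  ((pvKmers k).foldl
    (fun (st : Option Int × List String) kmer =>
      let count := (DNA.map (fun s => pvMHD kmer s)).sum
      match st.1 with
      | none => (some count, [kmer])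
      | some b =>
        if count < b then (some count, [kmer])
        else if count = b then (st.1, st.2 ++ [kmer]) else st)
    (none, [])).2

-- ===== PRECONDITION & SPEC =====
def Spec_FindMedianString (DNA : List String) (k : Int) (out : List String) : Prop := out = FindMedianString_alt DNA k
instance (DNA : List String) (k : Int) (out : List String) : Decidable (Spec_FindMedianString DNA k out) := by unfold Spec_FindMedianString; infer_instance

-- ===== CLAIM (what is proved, stated in full; the proofs are below) =====
def Claim_equal_FindMedianString : Prop := ∀ (DNA : List String) (k : Int), Dom_FindMedianString DNA k → Spec_FindMedianString DNA k (FindMedianString DNA k)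

-- ===== LEMMAS AND PROOFS =====

-- the body of A's k-mer rebuilding loop, as a function
def pvStep (arr : List String) : List String :=
  arr.flatMap (fun s => pvBases.map (fun b => s ++ b))

-- B's loop body, abstracted over the count function
def pvBStep (c : String → Int) (st : Option Int × List String) (kmer : String) :
    Option Int × List String :=
  match st.1 with
  | none => (some (c kmer), [kmer])
  | some b =>
    if c kmer < b then (some (c kmer), [kmer])
    else if c kmer = b then (st.1, st.2 ++ [kmer]) else st

-- the char-list image of one pvStep
def pvCF (ls : List (List Char)) : List (List Char) :=
  ls.flatMap (fun l => ['A', 'C', 'G', 'T'].map (fun c => l ++ [c]))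

theorem pvStep_inner (arr : List String) :
    arr.foldl (fun array1 i => pvBases.foldl (fun a1 j => a1 ++ [i ++ j]) array1) [] = pvStep arr := by
  have h : ∀ (a1 : List String) (i : String),
      pvBases.foldl (fun a1 j => a1 ++ [i ++ j]) a1 = a1 ++ pvBases.map (fun b => i ++ b) := by
    intro a1 i; simp [pvBases]
  simp only [h]
  rw [PySem.List.foldl_append_eq_flatMap]
  simp [pvStep]

theorem foldl_ignore_iterate (l : List Int) (F : List String → List String) (init : List String) :
    l.foldl (fun a _ => F a) init = F^[l.length] init := by
  induction l generalizing init with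
  | nil => rfl
  | cons x t ih => simp [List.foldl, ih, Function.iterate_succ_apply]

theorem ATGC_eq_iterate (k : Int) : ATGC_Combinations k = pvStep^[(k - 1).toNat] pvBases := by
  rw [ATGC_Combinations]
  have h : ∀ arr, (fun array _ =>
      array.foldl (fun array1 i => pvBases.foldl (fun a1 j => a1 ++ [i ++ j]) array1) []) arr (0 : Int)
      = pvStep arr := fun arr => pvStep_inner arr
  rw [show (fun (array : List String) (_ : Int) =>
      array.foldl (fun array1 i => pvBases.foldl (fun a1 j => a1 ++ [i ++ j]) array1) [])
      = (fun (array : List String) (_ : Int) => pvStep array) from funext fun a => funext fun _ => pvStep_inner a]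
  rw [foldl_ignore_iterate]
  rw [PySem.List.length_pyRange_one]
  norm_num

theorem pvKmers_eq_iterate : ∀ (n : Nat) (k : Int), (k - 1).toNat = n → pvKmers k = pvStep^[n] pvBases := by
  intro n
  induction n with
  | zero => intro k hk; rw [pvKmers, if_pos (by omega)]; rfl
  | succ m ih =>
    intro k hk
    rw [pvKmers, if_neg (by omega), ih (k - 1) (by omega), Function.iterate_succ_apply']
    rfl

theorem ATGC_eq_pvKmers (k : Int) : ATGC_Combinations k = pvKmers k := by
  rw [ATGC_eq_iterate, pvKmers_eq_iterate (k - 1).toNat k rfl]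

theorem map_toList_pvStep (arr : List String) :
    (pvStep arr).map String.toList = pvCF (arr.map String.toList) := by
  simp [pvStep, pvCF, pvBases, List.map_flatMap, List.flatMap_map, String.toList_append]

theorem pvCF_nodup (ls : List (List Char)) (n : Nat) (hn : ls.Nodup)
    (hl : ∀ l ∈ ls, l.length = n) : (pvCF ls).Nodup ∧ ∀ l ∈ pvCF ls, l.length = n + 1 := by
  constructor
  · rw [pvCF, List.nodup_flatMap]
    constructor
    · intro x hx
      simp [List.Nodup]
    · have := hn
      rw [List.Nodup] at this
      refine this.imp_of_mem ?_
      intro a b ha hb hab x hxa hxb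
      simp only [List.mem_map] at hxa hxb
      obtain ⟨c, hc, hx⟩ := hxa
      obtain ⟨c', hc', hx'⟩ := hxb
      apply hab
      have hlen : a.length = b.length := by rw [hl a ha, hl b hb]
      exact List.append_inj_left (hx.trans hx'.symm) hlen
  · intro l hlm
    simp only [pvCF, List.mem_flatMap, List.mem_map] at hlm
    obtain ⟨a, ha, c, hc, hx⟩ := hlm
    subst hx
    simp [hl a ha]

theorem pvInv (n : Nat) :
    ((pvStep^[n] pvBases).map String.toList).Nodup ∧
    ∀ l ∈ (pvStep^[n] pvBases).map String.toList, l.length = n + 1 := by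
  induction n with
  | zero => constructor <;> simp [pvBases]
  | succ m ih =>
    rw [Function.iterate_succ_apply', map_toList_pvStep]
    exact pvCF_nodup _ _ ih.1 ih.2

theorem pvKmers_nodup (k : Int) : (pvKmers k).Nodup := by
  rw [pvKmers_eq_iterate (k - 1).toNat k rfl]
  exact (pvInv (k - 1).toNat).1.of_map

theorem pvKmers_len_mem (k : Int) (s : String) (hs : s ∈ pvKmers k) :
    s.toList.length = (k - 1).toNat + 1 := by
  rw [pvKmers_eq_iterate (k - 1).toNat k rfl] at hs
  exact (pvInv (k - 1).toNat).2 s.toList (List.mem_map_of_mem hs)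

theorem pvStep_len (n : Nat) : (pvStep^[n] pvBases).length = 4 ^ (n + 1) := by
  induction n with
  | zero => rfl
  | succ m ih =>
    rw [Function.iterate_succ_apply']
    have hstep : ∀ arr : List String, (pvStep arr).length = 4 * arr.length := by
      intro arr
      simp [pvStep, pvBases, List.length_flatMap, List.map_const', List.sum_replicate,
        smul_eq_mul]
      ring
    rw [hstep, ih, pow_succ]
    ring

theorem pvKmers_length (k : Int) : (pvKmers k).length = 4 ^ ((k - 1).toNat + 1) := by
  rw [pvKmers_eq_iterate (k - 1).toNat k rfl, pvStep_len]

theorem pvKmers_ne_nil (k : Int) : pvKmers k ≠ [] := by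
  intro h
  have := pvKmers_length k
  rw [h] at this
  simp at this
  exact pow_ne_zero _ (by norm_num) this.symm

-- each k-mer is at most as long as the k-mer list itself
theorem pvKmers_len_le (k : Int) (s : String) (hs : s ∈ pvKmers k) :
    s.toList.length ≤ (pvKmers k).length := by
  rw [pvKmers_len_mem k s hs, pvKmers_length]
  calc (k - 1).toNat + 1 ≤ 2 ^ ((k - 1).toNat + 1) := (Nat.lt_two_pow_self).le
    _ ≤ 4 ^ ((k - 1).toNat + 1) := Nat.pow_le_pow_left (by norm_num) _

-- generic clamp fold only shrinks
theorem foldl_clamp_le (t : Int → Int) (l : List Int) (a : Int) :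
    l.foldl (fun d i => if d > t i then t i else d) a ≤ a := by
  induction l generalizing a with
  | nil => exact le_refl a
  | cons x s ih =>
    refine le_trans (ih _) ?_
    dsimp only
    split_ifs with h <;> omega

theorem pvMHD_le (s1 s2 : String) : pvMHD s1 s2 ≤ (s1.toList.length : Int) := by
  exact foldl_clamp_le _ _ _

-- A's count loop computes B's sum
theorem count_eq (DNA : List String) (i : String) :
    (PySem.List.pyRange 0 (DNA.length : Int) 1).foldl
        (fun c j => c + pvMHD i (PySem.List.pyGetD DNA j "")) 0
    = (DNA.map (fun s => pvMHD i s)).sum := by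
  rw [PySem.List.foldl_pyRange_zero_pyGetD' DNA "" (fun c s => c + pvMHD i s) 0]
  rw [PySem.List.foldl_add]
  simp

theorem getD_foldl_insert_fn (c : String → Int) (p : List String) (d : PySem.Dict String Int)
    (i : String) (hi : i ∈ p) :
    (p.foldl (fun d x => d.insert x (c x)) d).getD i 0 = c i := by
  induction p using List.reverseRecOn generalizing d with
  | nil => simp at hi
  | append_singleton q x ih =>
    rw [List.foldl_append]
    simp only [List.foldl]
    rw [PySem.Dict.getD_insert]
    rcases List.mem_append.1 hi with h | h
    · split_ifs with he
      · rw [he]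
      · exact ih d h
    · simp at h; simp [h]

theorem keys_foldl_insert_fn (c : String → Int) (p : List String) (hp : p.Nodup) :
    (p.foldl (fun d x => d.insert x (c x)) PySem.Dict.empty).keys = p := by
  rw [PySem.Dict.keys_foldl_insert, PySem.Dict.keys_empty, PySem.Set.update_nil_left]
  exact PySem.Set.ofList_eq_self_of_nodup p hp

-- B's running-argmin fold: returns the minimum and the minimizers, in order
theorem bstep_spec (c : String → Int) (q : List String) (hq : q ≠ []) :
    ∃ m, q.foldl (pvBStep c) (none, []) = (some m, q.filter (fun i => c i == m)) ∧
      (∀ i ∈ q, m ≤ c i) ∧ ∃ i ∈ q, c i = m := by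
  induction q using List.reverseRecOn with
  | nil => exact absurd rfl hq
  | append_singleton q x ih =>
    rcases eq_or_ne q [] with h | h
    · subst h
      refine ⟨c x, ?_, ?_, ⟨x, by simp, rfl⟩⟩
      · simp [pvBStep]
      · intro i hi; simp at hi; simp [hi]
    · obtain ⟨m, hfold, hle, i0, hi0, hci0⟩ := ih h
      rw [List.foldl_append]
      simp only [List.foldl]
      rw [hfold]
      rcases lt_trichotomy (c x) m with hlt | heq | hgt
      · refine ⟨c x, ?_, ?_, ⟨x, by simp, rfl⟩⟩
        · simp only [pvBStep, if_pos hlt]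
          rw [List.filter_append]
          have : q.filter (fun i => c i == c x) = [] := by
            rw [List.filter_eq_nil_iff]
            intro a ha
            simp only [beq_iff_eq]
            have := hle a ha
            intro hc; omega
          simp [this]
        · intro i hi
          rcases List.mem_append.1 hi with h' | h'
          · have := hle i h'; omega
          · simp at h'; simp [h']
      · refine ⟨m, ?_, ?_, ⟨i0, by simp [hi0], hci0⟩⟩
        · simp only [pvBStep, if_neg (by omega : ¬ c x < m), if_pos heq]
          rw [List.filter_append]
          simp [heq]
        · intro i hi
          rcases List.mem_append.1 hi with h' | h'
          · exact hle i h'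
          · simp at h'; subst h'; omega
      · refine ⟨m, ?_, ?_, ⟨i0, by simp [hi0], hci0⟩⟩
        · simp only [pvBStep, if_neg (by omega : ¬ c x < m), if_neg (by omega : ¬ c x = m)]
          rw [List.filter_append]
          have : [x].filter (fun i => c i == m) = [] := by
            rw [List.filter_eq_nil_iff]
            intro a ha
            simp at ha
            simp only [ha, beq_iff_eq]
            omega
          simp [this]
        · intro i hi
          rcases List.mem_append.1 hi with h' | h'
          · exact hle i h'
          · simp at h'; subst h'; omega

-- the minimum value A's running-min loop ends with equals the minimum B attains
theorem min_agree (c : String → Int) (p : List String) (M m : Int)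
    (hM : ∀ i ∈ p, c i ≤ M) (hle : ∀ i ∈ p, m ≤ c i) (hatt : ∃ i ∈ p, c i = m) :
    p.foldl (fun a i => if a > c i then c i else a) M = m := by
  have hstep : (fun (a : Int) (i : String) => if a > c i then c i else a)
      = fun a i => min a (c i) := by
    funext a i; rw [min_def]; split_ifs <;> omega
  rw [hstep, show List.foldl (fun a i => min a (c i)) M p = (p.map c).foldl min M from (List.foldl_map (f := c) (g := fun a b => min a b)).symm]
  obtain ⟨i0, hi0, hci0⟩ := hatt
  have h1 := PySem.List.foldl_min_le (p.map c) M
  have h2 := PySem.List.foldl_min_mem (p.map c) M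
  have hub : (p.map c).foldl min M ≤ m := by
    have := h1.2 (c i0) (List.mem_map_of_mem hi0)
    omega
  have hlb : m ≤ (p.map c).foldl min M := by
    rcases h2 with h | h
    · rw [h]
      have := hM i0 hi0
      omega
    · obtain ⟨j, hj, hcj⟩ := List.mem_map.1 h
      have := hle j hj
      omega
  omega

-- ===== VERDICT (by name: the statement is the Claim_ definition above) =====
theorem FindMedianString_spec : Claim_equal_FindMedianString := by
  intro DNA k _
  unfold Spec_FindMedianString
  set cB : String → Int := fun i => (DNA.map (fun s => pvMHD i s)).sum with hcB
  have hB : FindMedianString_alt DNA k = ((pvKmers k).foldl (pvBStep cB) (none, [])).2 := rfl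
  obtain ⟨m, hfold, hle, hatt⟩ := bstep_spec cB (pvKmers k) (pvKmers_ne_nil k)
  -- reshape A
  simp only [FindMedianString]
  simp only [count_eq DNA]
  rw [PySem.List.foldl_prod_mk
    (f := fun (d : PySem.Dict String Int) (i : String) => d.insert i (cB i))
    (g := fun (a : Int) (i : String) => if a > cB i then cB i else a)]
  rw [ATGC_eq_pvKmers]
  dsimp only
  rw [keys_foldl_insert_fn cB (pvKmers k) (pvKmers_nodup k)]
  rw [PySem.List.foldl_append_if_eq_filter]
  have hbound : ∀ i ∈ pvKmers k, cB i ≤ (DNA.length : Int) * ((pvKmers k).length : Int) := by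
    intro i hi
    have h1 : ∀ x ∈ DNA.map (fun s => pvMHD i s), x ≤ ((i.toList.length : Nat) : Int) := by
      intro x hx
      obtain ⟨s, hs, hxe⟩ := List.mem_map.1 hx
      rw [← hxe]; exact pvMHD_le i s
    have h2 := List.sum_le_card_nsmul _ _ h1
    simp only [List.length_map, nsmul_eq_mul] at h2
    have h3 : ((i.toList.length : Nat) : Int) ≤ ((pvKmers k).length : Int) := by
      exact_mod_cast pvKmers_len_le k i hi
    calc cB i ≤ (DNA.length : Int) * (i.toList.length : Int) := h2
      _ ≤ _ := mul_le_mul_of_nonneg_left h3 (by positivity)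
  rw [min_agree cB (pvKmers k) _ m hbound hle hatt]
  rw [hB, hfold]
  simp only [List.nil_append]
  apply List.filter_congr
  intro i hi
  rw [getD_foldl_insert_fn cB (pvKmers k) PySem.Dict.empty i hi]
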